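-- pv_equiv track=rewrite | github.com/RaikyHH/SSHPot | forensic_logger.py | _sanitize_for_log
-- ===== SOURCE A (Python) =====
-- def _sanitize_for_log(text: str, max_length: int = 65536) -> str:
--     """
--     Sanitize text before logging to prevent log injection.
--
--     Args:
--         text: Text to sanitize
--         max_length: Maximum allowed length
--
--     Returns:
--         Sanitized text
--     """
--     if not isinstance(text, str):
--         text = str(text)
--
--     # Limit length
--     if len(text) > max_length:
--         text = text[:max_length] + "...[TRUNCATED]"
--
--     # Remove null bytes and non-printable characters except newlines/tabs
--     text = ''.join(c for c in text if c.isprintable() or c in '\n\t')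
--
--     # Escape newlines to prevent log injection
--     text = text.replace('\n', '\\n').replace('\r', '\\r')
--
--     return text
-- ===== SOURCE B (Python) =====
-- def _sanitize_for_log(text: str, max_length: int = 65536) -> str:
--     if not isinstance(text, str):
--         text = str(text)
--     if len(text) > max_length:
--         text = text[:max_length] + "...[TRUNCATED]"
--     out = []
--     for c in text:
--         if c == '\n':
--             out.append('\\n')
--         elif c == '\t' or c.isprintable():
--             out.append(c)
--         # everything else (including '\r') is dropped
--     return ''.join(out)
-- ===== Notes on version B (the rewrite author's own statement) =====
-- stated objective: alternative
-- what changed: Replaces the three separate passes (filter comprehension plus two str.replace scans) with one explicit loop that classifies each character once and builds the output pieces directly.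
import Mathlib
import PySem

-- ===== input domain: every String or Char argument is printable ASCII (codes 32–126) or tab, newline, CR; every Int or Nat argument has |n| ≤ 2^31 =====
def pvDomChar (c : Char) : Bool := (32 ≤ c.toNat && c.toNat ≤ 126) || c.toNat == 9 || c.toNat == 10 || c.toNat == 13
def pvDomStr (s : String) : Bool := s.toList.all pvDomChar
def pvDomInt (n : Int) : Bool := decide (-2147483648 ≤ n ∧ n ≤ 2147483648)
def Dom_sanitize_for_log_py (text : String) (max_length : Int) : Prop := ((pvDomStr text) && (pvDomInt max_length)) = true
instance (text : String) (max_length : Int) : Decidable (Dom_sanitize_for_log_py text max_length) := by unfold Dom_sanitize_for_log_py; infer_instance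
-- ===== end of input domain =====

-- B: one explicit classifying loop instead of A's filter pass plus two str.replace passes (alternative decomposition, same cost).

-- ===== PORT A =====
-- c.isprintable(): exact on the printable-ASCII + tab/newline/CR domain (codes 32..126 are printable, 9/10/13 are not)
def pyIsPrintable (c : Char) : Bool := 32 ≤ c.toNat && c.toNat ≤ 126

def sanitize_for_log_py (text : String) (max_length : Int) : String :=
  -- if len(text) > max_length: text = text[:max_length] + "...[TRUNCATED]"
  let cs := text.toList
  let cs := if (cs.length : Int) > max_length then
      PySem.Chars.slice cs none (some max_length) ++ "...[TRUNCATED]".toList else cs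
  -- text = ''.join(c for c in text if c.isprintable() or c in '\n\t')
  let cs := cs.filter (fun c => pyIsPrintable c || "\n\t".toList.contains c)
  -- text = text.replace('\n', '\\n').replace('\r', '\\r')
  let cs := PySem.Chars.replace (PySem.Chars.replace cs "\n".toList "\\n".toList)
      "\r".toList "\\r".toList
  String.ofList cs

-- ===== PORT B =====
def sanitize_for_log_py_alt (text : String) (max_length : Int) : String :=
  let cs := text.toList
  let cs := if (cs.length : Int) > max_length then
      PySem.Chars.slice cs none (some max_length) ++ "...[TRUNCATED]".toList else cs
  -- out = []; for c in text: classify c once; return ''.join(out)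
  let out := cs.foldl (fun acc c =>
      if c = '\n' then acc ++ ['\\', 'n']
      else if c = '\t' || pyIsPrintable c then acc ++ [c]
      else acc) []
  String.ofList out

-- ===== PRECONDITION & SPEC =====
def Spec_sanitize_for_log_py (text : String) (max_length : Int) (out : String) : Prop := out = sanitize_for_log_py_alt text max_length
instance (text : String) (max_length : Int) (out : String) : Decidable (Spec_sanitize_for_log_py text max_length out) := by unfold Spec_sanitize_for_log_py; infer_instance

-- ===== CLAIM (what is proved, stated in full; the proofs are below) =====
def Claim_equal_sanitize_for_log_py : Prop := ∀ (text : String) (max_length : Int), Dom_sanitize_for_log_py text max_length → Spec_sanitize_for_log_py text max_length (sanitize_for_log_py text max_length)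

-- ===== LEMMAS AND PROOFS =====

-- single-character replace is a flatMap
theorem replace_go_single (o : Char) (new : List Char) :
    ∀ (l acc : List Char), PySem.Chars.replace.go [o] new l.length l acc =
      acc.reverse ++ l.flatMap (fun c => if c = o then new else [c]) := by
  intro l
  induction l with
  | nil => intro acc; simp [PySem.Chars.replace.go]
  | cons c t ih =>
      intro acc
      show PySem.Chars.replace.go [o] new (t.length + 1) (c :: t) acc = _
      rw [PySem.Chars.replace.go]
      by_cases h : c = o
      · simp [h, List.isPrefixOf, ih, List.flatMap_cons]
      · have hp : [o].isPrefixOf (c :: t) = false := by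
          simp [List.isPrefixOf]
          exact fun e => h e.symm
        simp [hp, h, ih, List.flatMap_cons]

theorem replace_single (o : Char) (new s : List Char) :
    PySem.Chars.replace s [o] new = s.flatMap (fun c => if c = o then new else [c]) := by
  rw [PySem.Chars.replace]
  simp [replace_go_single]

theorem replace_single_not_mem (o : Char) (new s : List Char) (h : o ∉ s) :
    PySem.Chars.replace s [o] new = s := by
  rw [replace_single]
  induction s with
  | nil => rfl
  | cons c t ih =>
      simp at h
      have hc : ¬ c = o := fun e => h.1 e.symm
      simp [List.flatMap_cons, hc, ih h.2]

theorem flatMap_filter_if {α β : Type} (p : α → Bool) (g : α → List β) (l : List α) :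
    (l.filter p).flatMap g = l.flatMap (fun c => if p c then g c else []) := by
  induction l with
  | nil => rfl
  | cons c t ih =>
      by_cases h : p c = true <;> simp [h, List.flatMap_cons, ih]

theorem foldB_eq :
    ∀ (l : List Char) (acc : List Char),
      l.foldl (fun acc c =>
        if c = '\n' then acc ++ ['\\', 'n']
        else if c = '\t' || pyIsPrintable c then acc ++ [c]
        else acc) acc =
      acc ++ l.flatMap (fun c =>
        if c = '\n' then ['\\', 'n']
        else if c = '\t' || pyIsPrintable c then [c]
        else []) := by
  intro l
  induction l with
  | nil => intro acc; simp
  | cons c t ih =>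
      intro acc
      rw [List.foldl_cons, List.flatMap_cons, ih]
      by_cases h1 : c = '\n'
      · simp [h1]
      · by_cases h2 : (c = '\t' || pyIsPrintable c) = true <;> simp [h1, h2]

theorem core_eq (l : List Char) :
    PySem.Chars.replace
        (PySem.Chars.replace (l.filter (fun c => pyIsPrintable c || "\n\t".toList.contains c))
          "\n".toList "\\n".toList) "\r".toList "\\r".toList =
      l.foldl (fun acc c =>
        if c = '\n' then acc ++ ['\\', 'n']
        else if c = '\t' || pyIsPrintable c then acc ++ [c]
        else acc) [] := by
  have hA : PySem.Chars.replace (l.filter (fun c => pyIsPrintable c || "\n\t".toList.contains c))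
        "\n".toList "\\n".toList =
      l.flatMap (fun c =>
        if c = '\n' then ['\\', 'n']
        else if c = '\t' || pyIsPrintable c then [c]
        else []) := by
    have : ("\n".toList : List Char) = ['\n'] := by decide
    rw [this, replace_single, flatMap_filter_if]
    apply List.flatMap_congr
    intro c _
    by_cases h1 : c = '\n'
    · subst h1; decide
    · by_cases h2 : c = '\t'
      · subst h2; decide
      · simp [h1, h2]
  have hR : ('\r' : Char) ∉ l.flatMap (fun c =>
        if c = '\n' then ['\\', 'n']
        else if c = '\t' || pyIsPrintable c then [c]
        else []) := by
    intro hmem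
    rw [List.mem_flatMap] at hmem
    obtain ⟨c, _, hc⟩ := hmem
    by_cases h1 : c = '\n'
    · simp [h1] at hc
    · by_cases h2 : (c = '\t' || pyIsPrintable c) = true
      · simp [h1, h2] at hc
        subst hc
        simp [pyIsPrintable] at h2
      · simp [h1, h2] at hc
  have hr1 : ("\r".toList : List Char) = ['\r'] := by decide
  rw [hA, hr1, replace_single_not_mem _ _ _ hR, foldB_eq, List.nil_append]

-- ===== VERDICT (by name: the statement is the Claim_ definition above) =====
theorem sanitize_for_log_py_spec : Claim_equal_sanitize_for_log_py := by
  intro text max_length _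
  unfold Spec_sanitize_for_log_py sanitize_for_log_py sanitize_for_log_py_alt
  simp only [core_eq]
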